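-- pv_equiv track=rewrite | github.com/wuwenrui555/ccmux-telegram | src/ccmux_telegram/prompt.py | _render_mdv2
-- ===== SOURCE A (Python) =====
-- _MDV2_SPECIAL = set("_*[]()~`>#+-=|{}.!\\")
--
-- def _escape_mdv2_chunk(s: str) -> str:
--     """Escape every MarkdownV2 special char inside a literal chunk."""
--     return "".join("\\" + c if c in _MDV2_SPECIAL else c for c in s)
--
-- def _render_mdv2(text: str) -> str:
--     """Translate our limited Markdown to Telegram MarkdownV2.
--
--     Handles only ``**bold**`` and ``_italic_`` pairs; everything else is
--     escaped as literal. We bypass the full ``convert_markdown`` pipeline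
--     because its mistletoe parser rewrites ordered-list indentation
--     (``1. Yes`` / ``2. No``) and rejects ``** x**`` bold with a space
--     after the opening marker — both common in Claude's blocking UIs.
--     """
--     out: list[str] = []
--     out_lines: list[str] = []
--     for line in text.split("\n"):
--         i = 0
--         line_out: list[str] = []
--         while i < len(line):
--             if line[i : i + 2] == "**":
--                 end = line.find("**", i + 2)
--                 if end != -1:
--                     body = line[i + 2 : end]
--                     line_out.append("*")
--                     line_out.append(_escape_mdv2_chunk(body))
--                     line_out.append("*")
--                     i = end + 2
--                     continue
--             if line[i] == "_":
--                 end = line.find("_", i + 1)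
--                 if end != -1:
--                     body = line[i + 1 : end]
--                     line_out.append("_")
--                     line_out.append(_escape_mdv2_chunk(body))
--                     line_out.append("_")
--                     i = end + 1
--                     continue
--             c = line[i]
--             line_out.append("\\" + c if c in _MDV2_SPECIAL else c)
--             i += 1
--         out_lines.append("".join(line_out))
--     out.append("\n".join(out_lines))
--     return "".join(out)
-- ===== SOURCE B (Python) =====
-- _MDV2_SPECIAL = "_*[]()~`>#+-=|{}.!\\"
--
-- # bulk escape table: every special char -> backslash + itself
-- _MDV2_ESC = {ord(c): "\\" + c for c in _MDV2_SPECIAL}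
--
--
-- def _render_line(rest: str) -> str:
--     """Consume the line as a shrinking suffix.
--
--     No indices: the head of the suffix is inspected with startswith, and a
--     closing marker is found with str.partition, which also hands back the
--     body and the remaining suffix in one step.  Literal chunks are escaped
--     in bulk with str.translate.
--     """
--     pieces = []
--     while rest:
--         if rest.startswith("**"):
--             body, sep, tail = rest[2:].partition("**")
--             if sep:
--                 pieces.append("*" + body.translate(_MDV2_ESC) + "*")
--                 rest = tail
--                 continue
--         if rest.startswith("_"):
--             body, sep, tail = rest[1:].partition("_")
--             if sep:
--                 pieces.append("_" + body.translate(_MDV2_ESC) + "_")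
--                 rest = tail
--                 continue
--         pieces.append(rest[0].translate(_MDV2_ESC))
--         rest = rest[1:]
--     return "".join(pieces)
--
--
-- def _render_mdv2(text: str) -> str:
--     return "\n".join(_render_line(line) for line in text.split("\n"))
-- ===== Notes on version B (the rewrite author's own statement) =====
-- stated objective: alternative
-- what changed: A walks each line with an integer cursor, calling line.find with explicit index arithmetic and escaping every literal character one append at a time; B consumes the line as a shrinking suffix with no indices at all: startswith tests the head, str.partition splits off body and remaining suffix at the closing marker in one step, and bodies are escaped in bulk with str.translate.
import Mathlib
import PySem

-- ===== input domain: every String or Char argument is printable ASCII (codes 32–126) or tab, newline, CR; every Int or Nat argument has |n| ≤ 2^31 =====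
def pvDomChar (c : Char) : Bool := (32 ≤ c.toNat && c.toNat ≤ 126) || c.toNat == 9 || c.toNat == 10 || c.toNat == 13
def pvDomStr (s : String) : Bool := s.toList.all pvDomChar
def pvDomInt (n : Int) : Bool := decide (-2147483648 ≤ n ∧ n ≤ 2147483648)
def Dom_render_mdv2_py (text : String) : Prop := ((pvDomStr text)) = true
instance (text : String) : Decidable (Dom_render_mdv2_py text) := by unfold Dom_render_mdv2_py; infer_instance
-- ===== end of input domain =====

-- B replaces A's integer-cursor loop (line.find + index slices, per-char escaping) by a
-- suffix-consuming scanner: startswith at the head, str.partition for the closing marker,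
-- bulk-escaped bodies; same output, alternative decomposition (no speed claim).


-- ===== PORT A =====
-- ports work on code-point lists (exact: PySem string functions are defined on List Char)

-- _MDV2_SPECIAL (membership tests only)
def mdv2SpecialsA : List Char := "_*[]()~`>#+-=|{}.!\\".toList

-- '"\\" + c if c in _MDV2_SPECIAL else c'
def escCharA (c : Char) : List Char := if mdv2SpecialsA.contains c then ['\\', c] else [c]

-- _escape_mdv2_chunk: '"".join(escaped chars)'
def escapeChunkA (s : List Char) : List Char := (s.map escCharA).flatten

-- helper facts cited by loopA's decreasing_by (and by the proofs below)
theorem slice_two_eq (ln : List Char) (i : Nat) :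
    PySem.List.slice ln (some (i:Int)) (some ((i:Int)+2)) = (ln.drop i).take 2 := by
  have h : ((i:Int)+2) = ((i+2 : Nat) : Int) := by push_cast; ring
  rw [h, PySem.List.slice_natCast]
  congr 1
  omega

theorem boldGuardFacts (ln : List Char) (i : Nat)
    (h1 : PySem.List.slice ln (some (i:Int)) (some ((i:Int)+2)) = ['*','*'])
    (h2 : PySem.Chars.findFrom ln ['*','*'] ((i:Int)+2) ≠ -1) :
    i + 2 ≤ ln.length ∧
    PySem.Chars.findFrom ln ['*','*'] ((i:Int)+2)
      = ((i:Int)+2) + PySem.Chars.find (ln.drop (i+2)) ['*','*'] ∧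
    0 ≤ PySem.Chars.find (ln.drop (i+2)) ['*','*'] ∧
    (PySem.Chars.find (ln.drop (i+2)) ['*','*']).toNat + 2 + (i+2) ≤ ln.length := by
  rw [slice_two_eq] at h1
  have hlen : i + 2 ≤ ln.length := by
    have := congrArg List.length h1
    simp at this
    omega
  have hcast : ((i:Int)+2) = ((i+2 : Nat) : Int) := by push_cast; ring
  rw [hcast] at h2 ⊢
  rw [PySem.Chars.findFrom_natCast _ _ _ hlen] at h2 ⊢
  by_cases hf : PySem.Chars.find (ln.drop (i+2)) ['*','*'] = -1
  · simp [hf] at h2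
  · have hge : 0 ≤ PySem.Chars.find (ln.drop (i+2)) ['*','*'] := by
      have := PySem.Chars.neg_one_le_find (ln.drop (i+2)) ['*','*']
      omega
    have hpre := (PySem.Chars.find_spec hge).1
    have hlen2 := hpre.length_le
    simp only [List.length_drop, List.length_cons, List.length_nil] at hlen2
    rw [if_neg hf]
    exact ⟨hlen, rfl, hge, by omega⟩

theorem italGuardFacts (ln : List Char) (i : Nat) (hlt : i < ln.length)
    (h2 : PySem.Chars.findFrom ln ['_'] ((i:Int)+1) ≠ -1) :
    PySem.Chars.findFrom ln ['_'] ((i:Int)+1)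
      = ((i:Int)+1) + PySem.Chars.find (ln.drop (i+1)) ['_'] ∧
    0 ≤ PySem.Chars.find (ln.drop (i+1)) ['_'] ∧
    (PySem.Chars.find (ln.drop (i+1)) ['_']).toNat + 1 + (i+1) ≤ ln.length := by
  have hlen : i + 1 ≤ ln.length := by omega
  have hcast : ((i:Int)+1) = ((i+1 : Nat) : Int) := by push_cast; ring
  rw [hcast] at h2 ⊢
  rw [PySem.Chars.findFrom_natCast _ _ _ hlen] at h2 ⊢
  by_cases hf : PySem.Chars.find (ln.drop (i+1)) ['_'] = -1
  · simp [hf] at h2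
  · have hge : 0 ≤ PySem.Chars.find (ln.drop (i+1)) ['_'] := by
      have := PySem.Chars.neg_one_le_find (ln.drop (i+1)) ['_']
      omega
    have hpre := (PySem.Chars.find_spec hge).1
    have hlen2 := hpre.length_le
    simp only [List.length_drop, List.length_cons, List.length_nil] at hlen2
    rw [if_neg hf]
    exact ⟨rfl, hge, by omega⟩

theorem loopA_dec_bold (ln : List Char) (i : Nat)
    (h1 : PySem.List.slice ln (some (i:Int)) (some ((i:Int)+2)) = ['*','*'])
    (h2 : PySem.Chars.findFrom ln ['*','*'] ((i:Int)+2) ≠ -1) :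
    ln.length - ((PySem.Chars.findFrom ln ['*','*'] ((i:Int)+2)).toNat + 2) < ln.length - i := by
  obtain ⟨ha, hb, hc, hd⟩ := boldGuardFacts ln i h1 h2
  omega

theorem loopA_dec_ital (ln : List Char) (i : Nat) (hlt : i < ln.length)
    (h2 : PySem.Chars.findFrom ln ['_'] ((i:Int)+1) ≠ -1) :
    ln.length - ((PySem.Chars.findFrom ln ['_'] ((i:Int)+1)).toNat + 1) < ln.length - i := by
  obtain ⟨ha, hb, hc⟩ := italGuardFacts ln i hlt h2
  omega

theorem loopA_dec_lit (ln : List Char) (i : Nat) (hlt : i < ln.length) :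
    ln.length - (i + 1) < ln.length - i := by
  omega

-- the 'while i < len(ln)' loop of _render_mdv2: returns the pieces appended to line_out from
-- index i on (nested 'if end != -1' fall-through written as a conjunctive guard)
def loopA (ln : List Char) (i : Nat) : List (List Char) :=
  if hlt : i < ln.length then
    if hb : PySem.List.slice ln (some (i:Int)) (some ((i:Int)+2)) = ['*','*'] ∧
        PySem.Chars.findFrom ln ['*','*'] ((i:Int)+2) ≠ -1 then
      let e := PySem.Chars.findFrom ln ['*','*'] ((i:Int)+2)
      let body := PySem.List.slice ln (some ((i:Int)+2)) (some e)
      ['*'] :: escapeChunkA body :: ['*'] :: loopA ln (e.toNat + 2)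
    else if hu : PySem.List.pyGet? ln (i:Int) = some '_' ∧
        PySem.Chars.findFrom ln ['_'] ((i:Int)+1) ≠ -1 then
      let e := PySem.Chars.findFrom ln ['_'] ((i:Int)+1)
      let body := PySem.List.slice ln (some ((i:Int)+1)) (some e)
      ['_'] :: escapeChunkA body :: ['_'] :: loopA ln (e.toNat + 1)
    else
      (match PySem.List.pyGet? ln (i:Int) with
       | some c => escCharA c
       | none => []) :: loopA ln (i + 1)  -- none unreachable: i < len(ln)
  else []
termination_by ln.length - i
decreasing_by
  · exact loopA_dec_bold ln i hb.1 hb.2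
  · exact loopA_dec_ital ln i hlt hu.2
  · exact loopA_dec_lit ln i hlt

def render_mdv2_py (text : String) : String :=
  let outLines := (PySem.Chars.splitOn text.toList ['\n']).map
    (fun ln => PySem.Chars.join [] (loopA ln 0))   -- '"".join(line_out)'
  -- out = ['\n'.join(out_lines)]; return "".join(out)
  String.ofList (PySem.Chars.join [] [PySem.Chars.join ['\n'] outLines])

-- ===== PORT B =====
-- _MDV2_SPECIAL of Source B
def mdv2SpecialsB : List Char := "_*[]()~`>#+-=|{}.!\\".toList

-- the _MDV2_ESC translation-table entry for one char (identity when absent)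
def escTransB (c : Char) : List Char := if mdv2SpecialsB.contains c then ['\\', c] else [c]

-- s.translate(_MDV2_ESC)
def translateB (s : List Char) : List Char := (s.map escTransB).flatten

-- s.partition(mark): some (body, tail) when mark occurs (sep non-empty), none otherwise
def partitionB (s mark : List Char) : Option (List Char × List Char) :=
  let j := PySem.Chars.find s mark
  if j = -1 then none else some (s.take j.toNat, s.drop (j.toNat + mark.length))

-- facts cited by coreB's decreasing_by
theorem partitionB_tail_len (s mark : List Char) (h : (partitionB s mark).isSome) :
    ((partitionB s mark).get h).2.length
      = s.length - ((PySem.Chars.find s mark).toNat + mark.length) := by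
  unfold partitionB at h ⊢
  by_cases hj : PySem.Chars.find s mark = -1
  · simp [hj] at h
  · simp [hj]

theorem coreB_dec_bold (s : List Char) (hs : ¬ s = [])
    (h : (partitionB (s.drop 2) ['*','*']).isSome) :
    ((partitionB (s.drop 2) ['*','*']).get h).2.length < s.length := by
  rw [partitionB_tail_len]
  have : s.length ≠ 0 := fun hz => hs (List.eq_nil_of_length_eq_zero hz)
  simp only [List.length_drop]
  omega

theorem coreB_dec_ital (s : List Char) (hs : ¬ s = [])
    (h : (partitionB (s.drop 1) ['_']).isSome) :
    ((partitionB (s.drop 1) ['_']).get h).2.length < s.length := by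
  rw [partitionB_tail_len]
  have : s.length ≠ 0 := fun hz => hs (List.eq_nil_of_length_eq_zero hz)
  simp only [List.length_drop]
  omega

theorem coreB_dec_tail (s : List Char) (hs : ¬ s = []) : s.tail.length < s.length := by
  have : s.length ≠ 0 := fun hz => hs (List.eq_nil_of_length_eq_zero hz)
  simp only [List.length_tail]
  omega

-- _render_line's 'while rest:' loop, recursing on the shrinking suffix
-- ('if sep:' fall-through written as a conjunctive guard with Option.isSome)
def coreB (s : List Char) : List Char :=
  if hs : s = [] then []
  else if hb : s.take 2 = ['*','*'] ∧ (partitionB (s.drop 2) ['*','*']).isSome then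
    let pr := (partitionB (s.drop 2) ['*','*']).get hb.2
    ('*' :: translateB pr.1 ++ ['*']) ++ coreB pr.2
  else if hu : s.take 1 = ['_'] ∧ (partitionB (s.drop 1) ['_']).isSome then
    let pr := (partitionB (s.drop 1) ['_']).get hu.2
    ('_' :: translateB pr.1 ++ ['_']) ++ coreB pr.2
  else translateB (s.take 1) ++ coreB s.tail    -- rest[0].translate; rest = rest[1:]
termination_by s.length
decreasing_by
  · exact coreB_dec_bold s hs hb.2
  · exact coreB_dec_ital s hs hu.2
  · exact coreB_dec_tail s hs

def render_mdv2_py_alt (text : String) : String :=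
  String.ofList (PySem.Chars.join ['\n']
    ((PySem.Chars.splitOn text.toList ['\n']).map coreB))

-- ===== PRECONDITION & SPEC =====
def Spec_render_mdv2_py (text : String) (out : String) : Prop := out = render_mdv2_py_alt text
instance (text : String) (out : String) : Decidable (Spec_render_mdv2_py text out) := by unfold Spec_render_mdv2_py; infer_instance

-- ===== CLAIM (what is proved, stated in full; the proofs are below) =====
def Claim_equal_render_mdv2_py : Prop := ∀ (text : String), Dom_render_mdv2_py text → Spec_render_mdv2_py text (render_mdv2_py text)

-- ===== LEMMAS AND PROOFS =====

-- canonical per-line result, recursing on the remaining suffix of the line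
def Rcore (s : List Char) : List Char :=
  if hs : s = [] then []
  else if hb : s.take 2 = ['*','*'] ∧ PySem.Chars.find (s.drop 2) ['*','*'] ≠ -1 then
    let j := (PySem.Chars.find (s.drop 2) ['*','*']).toNat
    '*' :: escapeChunkA ((s.drop 2).take j) ++ '*' :: Rcore ((s.drop 2).drop (j + 2))
  else if hu : s.head? = some '_' ∧ PySem.Chars.find (s.drop 1) ['_'] ≠ -1 then
    let j := (PySem.Chars.find (s.drop 1) ['_']).toNat
    '_' :: escapeChunkA ((s.drop 1).take j) ++ '_' :: Rcore ((s.drop 1).drop (j + 1))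
  else escCharA (s.headD ' ') ++ Rcore s.tail
termination_by s.length
decreasing_by
  all_goals
    cases s with
    | nil => exact absurd rfl hs
    | cons c t => simp only [List.length_drop, List.length_cons, List.length_tail]; omega

theorem join_nil_flatten : ∀ ps : List (List Char), PySem.Chars.join [] ps = ps.flatten
  | [] => by rw [PySem.Chars.join_nil]; rfl
  | [p] => by rw [PySem.Chars.join_singleton]; simp
  | p :: q :: rest => by
    rw [PySem.Chars.join_cons_cons, join_nil_flatten (q :: rest)]
    simp

theorem slice_int_eq (ln : List Char) (a b : Int) (ha : 0 ≤ a) (hb : a ≤ b) :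
    PySem.List.slice ln (some a) (some b) = (ln.drop a.toNat).take (b.toNat - a.toNat) := by
  have h1 : a = ((a.toNat : Nat) : Int) := by omega
  have h2 : b = ((b.toNat : Nat) : Int) := by omega
  rw [h1, h2, PySem.List.slice_natCast]
  simp only [Int.toNat_natCast]

-- one literal step of Rcore when neither marker fires at the cursor
theorem Rcore_step (ln : List Char) (i : Nat) (hi : i < ln.length)
    (hb : ¬ (['*','*'] <+: ln.drop i ∧ PySem.Chars.find (ln.drop (i+2)) ['*','*'] ≠ -1))
    (hu : ¬ (ln[i]? = some '_' ∧ PySem.Chars.find (ln.drop (i+1)) ['_'] ≠ -1)) :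
    Rcore (ln.drop i) = escCharA ((ln[i]?).getD ' ') ++ Rcore (ln.drop (i+1)) := by
  have hne : ln.drop i ≠ [] := by
    intro h
    have := congrArg List.length h
    simp at this
    omega
  rw [Rcore, dif_neg hne]
  have hd2 : (ln.drop i).drop 2 = ln.drop (i+2) := List.drop_drop
  have hd1 : (ln.drop i).drop 1 = ln.drop (i+1) := List.drop_drop
  have hbg : ¬ ((ln.drop i).take 2 = ['*','*'] ∧
      PySem.Chars.find ((ln.drop i).drop 2) ['*','*'] ≠ -1) := by
    rw [hd2]
    rintro ⟨h1, h2⟩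
    exact hb ⟨by rw [List.prefix_iff_eq_take]; exact h1.symm, h2⟩
  have hug : ¬ ((ln.drop i).head? = some '_' ∧
      PySem.Chars.find ((ln.drop i).drop 1) ['_'] ≠ -1) := by
    rw [hd1, List.head?_drop]
    exact hu
  rw [dif_neg hbg, dif_neg hug]
  congr 1
  · congr 1
    rw [List.drop_eq_getElem_cons hi, List.getElem?_eq_getElem hi]
    rfl
  · rw [List.tail_drop]

-- Rcore at a bold opener with a closing marker
theorem Rcore_bold (ln : List Char) (p : Nat)
    (hocc : ['*','*'] <+: ln.drop p)
    (hf : PySem.Chars.find (ln.drop (p+2)) ['*','*'] ≠ -1) :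
    Rcore (ln.drop p) =
      '*' :: escapeChunkA ((ln.drop (p+2)).take (PySem.Chars.find (ln.drop (p+2)) ['*','*']).toNat)
        ++ '*' :: Rcore ((ln.drop (p+2)).drop ((PySem.Chars.find (ln.drop (p+2)) ['*','*']).toNat + 2)) := by
  have hne : ln.drop p ≠ [] := by
    intro h
    rw [h] at hocc
    have := hocc.length_le
    simp at this
  have hd2 : (ln.drop p).drop 2 = ln.drop (p+2) := List.drop_drop
  have htake : (ln.drop p).take 2 = ['*','*'] := by
    rw [List.prefix_iff_eq_take] at hocc
    exact hocc.symm
  rw [Rcore, dif_neg hne, dif_pos ⟨htake, by rw [hd2]; exact hf⟩]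
  rw [hd2]

-- Rcore at an italic opener with a closing marker
theorem Rcore_ital (ln : List Char) (p : Nat)
    (hc : ln[p]? = some '_')
    (hf : PySem.Chars.find (ln.drop (p+1)) ['_'] ≠ -1) :
    Rcore (ln.drop p) =
      '_' :: escapeChunkA ((ln.drop (p+1)).take (PySem.Chars.find (ln.drop (p+1)) ['_']).toNat)
        ++ '_' :: Rcore ((ln.drop (p+1)).drop ((PySem.Chars.find (ln.drop (p+1)) ['_']).toNat + 1)) := by
  have hp : p < ln.length := by
    by_contra hp
    rw [List.getElem?_eq_none (by omega)] at hc
    simp at hc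
  have hg : ln[p] = '_' := by
    have := List.getElem?_eq_getElem hp
    rw [this] at hc
    exact Option.some.inj hc
  have hne : ln.drop p ≠ [] := by
    intro h
    have := congrArg List.length h
    simp at this
    omega
  have hd1 : (ln.drop p).drop 1 = ln.drop (p+1) := List.drop_drop
  have hbg : ¬ ((ln.drop p).take 2 = ['*','*'] ∧
      PySem.Chars.find ((ln.drop p).drop 2) ['*','*'] ≠ -1) := by
    rintro ⟨h1, _⟩
    rw [List.drop_eq_getElem_cons hp, hg, List.take_succ_cons] at h1
    simp at h1
  have hug : (ln.drop p).head? = some '_' := by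
    rw [List.head?_drop, List.getElem?_eq_getElem hp, hg]
  rw [Rcore, dif_neg hne, dif_neg hbg, dif_pos ⟨hug, by rw [hd1]; exact hf⟩]
  rw [hd1]

-- findFrom at a Nat start is find on the suffix
theorem findFrom_shift (ln : List Char) (k : Nat) (hk : k ≤ ln.length) (sub : List Char) :
    (PySem.Chars.findFrom ln sub ((k:Nat):Int) ≠ -1) ↔ PySem.Chars.find (ln.drop k) sub ≠ -1 := by
  rw [PySem.Chars.findFrom_natCast _ _ _ hk]
  by_cases hf : PySem.Chars.find (ln.drop k) sub = -1
  · simp [hf]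
  · have := PySem.Chars.neg_one_le_find (ln.drop k) sub
    simp [hf]
    omega

theorem take_two_len (ln : List Char) (i : Nat) (h : (ln.drop i).take 2 = ['*','*']) :
    i + 2 ≤ ln.length := by
  have := congrArg List.length h
  simp at this
  omega

theorem loopA_eq_aux : ∀ (n : Nat) (ln : List Char) (i : Nat), ln.length - i = n →
    (loopA ln i).flatten = Rcore (ln.drop i) := by
  intro n
  induction n using Nat.strong_induction_on with
  | _ n IH =>
    intro ln i hn
    by_cases hlt : i < ln.length
    case neg =>
      rw [loopA, dif_neg hlt, List.drop_eq_nil_of_le (by omega), Rcore]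
      simp
    case pos =>
      rw [loopA, dif_pos hlt]
      have hcast2 : ((i:Int)+2) = (((i+2:Nat)):Int) := by push_cast; ring
      have hcast1 : ((i:Int)+1) = (((i+1:Nat)):Int) := by push_cast; ring
      by_cases hb : PySem.List.slice ln (some (i:Int)) (some ((i:Int)+2)) = ['*','*'] ∧
          PySem.Chars.findFrom ln ['*','*'] ((i:Int)+2) ≠ -1
      · rw [dif_pos hb]
        show (['*'] :: escapeChunkA (PySem.List.slice ln (some ((i:Int)+2))
            (some (PySem.Chars.findFrom ln ['*','*'] ((i:Int)+2)))) :: ['*'] ::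
            loopA ln ((PySem.Chars.findFrom ln ['*','*'] ((i:Int)+2)).toNat + 2)).flatten
          = Rcore (ln.drop i)
        obtain ⟨hlen2, hff, hge, hocc2⟩ := boldGuardFacts ln i hb.1 hb.2
        set j : Nat := (PySem.Chars.find (ln.drop (i+2)) ['*','*']).toNat with hj
        have htake : (ln.drop i).take 2 = ['*','*'] := by
          rw [← slice_two_eq]
          exact hb.1
        have hpre : ['*','*'] <+: ln.drop i := by
          rw [List.prefix_iff_eq_take]
          exact htake.symm
        have hfne : PySem.Chars.find (ln.drop (i+2)) ['*','*'] ≠ -1 := by omega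
        have het : (PySem.Chars.findFrom ln ['*','*'] ((i:Int)+2)).toNat = i + 2 + j := by
          rw [hff]
          omega
        have hbody : PySem.List.slice ln (some ((i:Int)+2))
            (some (PySem.Chars.findFrom ln ['*','*'] ((i:Int)+2)))
            = (ln.drop (i+2)).take j := by
          rw [slice_int_eq ln _ _ (by omega) (by rw [hff]; omega)]
          rw [het]
          have ha2 : ((i:Int)+2).toNat = i + 2 := by omega
          rw [ha2]
          congr 1
          omega
        rw [hbody, het]
        have hrec := IH (ln.length - (i+2+j+2)) (by omega) ln (i+2+j+2) rfl
        rw [Rcore_bold ln i hpre hfne, ← hj]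
        have hix : i + 2 + (j + 2) = i + 2 + j + 2 := by omega
        have hdd : (ln.drop (i+2)).drop (j+2) = ln.drop (i+2+j+2) := by
          rw [List.drop_drop, hix]
        rw [hdd, ← hrec]
        all_goals simp
      rw [dif_neg hb]
      by_cases hu : PySem.List.pyGet? ln (i:Int) = some '_' ∧
          PySem.Chars.findFrom ln ['_'] ((i:Int)+1) ≠ -1
      · rw [dif_pos hu]
        show (['_'] :: escapeChunkA (PySem.List.slice ln (some ((i:Int)+1))
            (some (PySem.Chars.findFrom ln ['_'] ((i:Int)+1)))) :: ['_'] ::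
            loopA ln ((PySem.Chars.findFrom ln ['_'] ((i:Int)+1)).toNat + 1)).flatten
          = Rcore (ln.drop i)
        have hgete : PySem.List.pyGet? ln (i:Int) = ln[i]? := by
          simp [PySem.List.pyGet?_natCast]
        have hgc : ln[i]? = some '_' := by rw [← hgete]; exact hu.1
        have hfne : PySem.Chars.find (ln.drop (i+1)) ['_'] ≠ -1 := by
          rw [← findFrom_shift ln (i+1) (by omega) ['_'], ← hcast1]
          exact hu.2
        obtain ⟨hff, hge, hocc1⟩ := italGuardFacts ln i hlt hu.2
        set j : Nat := (PySem.Chars.find (ln.drop (i+1)) ['_']).toNat with hj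
        have het : (PySem.Chars.findFrom ln ['_'] ((i:Int)+1)).toNat = i + 1 + j := by
          rw [hff]
          omega
        have hbody : PySem.List.slice ln (some ((i:Int)+1))
            (some (PySem.Chars.findFrom ln ['_'] ((i:Int)+1)))
            = (ln.drop (i+1)).take j := by
          rw [slice_int_eq ln _ _ (by omega) (by rw [hff]; omega)]
          rw [het]
          have ha1 : ((i:Int)+1).toNat = i + 1 := by omega
          rw [ha1]
          congr 1
          omega
        rw [hbody, het]
        have hrec := IH (ln.length - (i+1+j+1)) (by omega) ln (i+1+j+1) rfl
        rw [Rcore_ital ln i hgc hfne, ← hj]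
        have hix : i + 1 + (j + 1) = i + 1 + j + 1 := by omega
        have hdd : (ln.drop (i+1)).drop (j+1) = ln.drop (i+1+j+1) := by
          rw [List.drop_drop, hix]
        rw [hdd, ← hrec]
        all_goals simp
      · rw [dif_neg hu]
        have hgete : PySem.List.pyGet? ln (i:Int) = ln[i]? := by
          simp [PySem.List.pyGet?_natCast]
        have hbg : ¬ (['*','*'] <+: ln.drop i ∧
            PySem.Chars.find (ln.drop (i+2)) ['*','*'] ≠ -1) := by
          rintro ⟨h1, h2⟩
          apply hb
          have htake : (ln.drop i).take 2 = ['*','*'] := by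
            rw [List.prefix_iff_eq_take] at h1
            exact h1.symm
          refine ⟨by rw [slice_two_eq]; exact htake, ?_⟩
          rw [hcast2, findFrom_shift ln (i+2) (take_two_len ln i htake) ['*','*']]
          exact h2
        have hug : ¬ (ln[i]? = some '_' ∧
            PySem.Chars.find (ln.drop (i+1)) ['_'] ≠ -1) := by
          rintro ⟨h1, h2⟩
          apply hu
          refine ⟨by rw [hgete]; exact h1, ?_⟩
          rw [hcast1, findFrom_shift ln (i+1) (by omega) ['_']]
          exact h2
        rw [Rcore_step ln i hlt hbg hug]
        have hc : ln[i]? = some ln[i] := List.getElem?_eq_getElem hlt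
        rw [hgete, hc]
        have hrec := IH (ln.length - (i+1)) (by omega) ln (i+1) rfl
        rw [← hrec]
        simp [escCharA]

theorem loopA_eq_Rcore (ln : List Char) :
    (loopA ln 0).flatten = Rcore ln := by
  have := loopA_eq_aux ln.length ln 0 rfl
  simpa using this

-- partitionB succeeds exactly when find succeeds
theorem partitionB_isSome (s mark : List Char) :
    (partitionB s mark).isSome ↔ PySem.Chars.find s mark ≠ -1 := by
  unfold partitionB
  by_cases hj : PySem.Chars.find s mark = -1 <;> simp [hj]

theorem partitionB_get (s mark : List Char) (h : (partitionB s mark).isSome) :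
    (partitionB s mark).get h
      = (s.take (PySem.Chars.find s mark).toNat,
         s.drop ((PySem.Chars.find s mark).toNat + mark.length)) := by
  unfold partitionB at h ⊢
  by_cases hj : PySem.Chars.find s mark = -1
  · simp [hj] at h
  · simp [hj]

theorem translateB_eq (s : List Char) : translateB s = escapeChunkA s := rfl

-- B's suffix scanner computes the canonical per-line result
theorem coreB_eq_Rcore : ∀ (n : Nat) (s : List Char), s.length = n → coreB s = Rcore s := by
  intro n
  induction n using Nat.strong_induction_on with
  | _ n IH =>
    intro s hn
    by_cases hs : s = []
    · rw [coreB, dif_pos hs, Rcore, dif_pos hs]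
    have hlen0 : s.length ≠ 0 := fun hz => hs (List.eq_nil_of_length_eq_zero hz)
    rw [coreB, dif_neg hs, Rcore, dif_neg hs]
    by_cases hb2 : s.take 2 = ['*','*'] ∧ (partitionB (s.drop 2) ['*','*']).isSome
    · have hfb : PySem.Chars.find (s.drop 2) ['*','*'] ≠ -1 :=
        (partitionB_isSome _ _).1 hb2.2
      rw [dif_pos hb2, dif_pos ⟨hb2.1, hfb⟩, partitionB_get]
      show ('*' :: translateB ((s.drop 2).take (PySem.Chars.find (s.drop 2) ['*','*']).toNat) ++ ['*'])
            ++ coreB ((s.drop 2).drop ((PySem.Chars.find (s.drop 2) ['*','*']).toNat + 2))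
          = '*' :: escapeChunkA ((s.drop 2).take (PySem.Chars.find (s.drop 2) ['*','*']).toNat)
            ++ '*' :: Rcore ((s.drop 2).drop ((PySem.Chars.find (s.drop 2) ['*','*']).toNat + 2))
      have hlt : ((s.drop 2).drop ((PySem.Chars.find (s.drop 2) ['*','*']).toNat + 2)).length < n := by
        simp only [List.length_drop]
        omega
      rw [IH _ hlt _ rfl, translateB_eq]
      simp
    have hbneg : ¬ (s.take 2 = ['*','*'] ∧ PySem.Chars.find (s.drop 2) ['*','*'] ≠ -1) := by
      rintro ⟨h1, h2⟩
      exact hb2 ⟨h1, (partitionB_isSome _ _).2 h2⟩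
    rw [dif_neg hb2, dif_neg hbneg]
    by_cases hu2 : s.take 1 = ['_'] ∧ (partitionB (s.drop 1) ['_']).isSome
    · have hfu : PySem.Chars.find (s.drop 1) ['_'] ≠ -1 :=
        (partitionB_isSome _ _).1 hu2.2
      have hhead : s.head? = some '_' := by
        cases s with
        | nil => exact absurd rfl hs
        | cons c t =>
          have h1 : c = '_' := by simpa using hu2.1
          simp [h1]
      rw [dif_pos hu2, dif_pos ⟨hhead, hfu⟩, partitionB_get]
      show ('_' :: translateB ((s.drop 1).take (PySem.Chars.find (s.drop 1) ['_']).toNat) ++ ['_'])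
            ++ coreB ((s.drop 1).drop ((PySem.Chars.find (s.drop 1) ['_']).toNat + 1))
          = '_' :: escapeChunkA ((s.drop 1).take (PySem.Chars.find (s.drop 1) ['_']).toNat)
            ++ '_' :: Rcore ((s.drop 1).drop ((PySem.Chars.find (s.drop 1) ['_']).toNat + 1))
      have hlt : ((s.drop 1).drop ((PySem.Chars.find (s.drop 1) ['_']).toNat + 1)).length < n := by
        simp only [List.length_drop]
        omega
      rw [IH _ hlt _ rfl, translateB_eq]
      simp
    · have huneg : ¬ (s.head? = some '_' ∧ PySem.Chars.find (s.drop 1) ['_'] ≠ -1) := by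
        rintro ⟨h1, h2⟩
        apply hu2
        refine ⟨?_, (partitionB_isSome _ _).2 h2⟩
        cases s with
        | nil => exact absurd rfl hs
        | cons c t =>
          have h1 : c = '_' := by simpa using h1
          simp [h1]
      rw [dif_neg hu2, dif_neg huneg]
      have hlt : s.tail.length < n := by
        simp only [List.length_tail]
        omega
      rw [IH _ hlt _ rfl]
      cases s with
      | nil => exact absurd rfl hs
      | cons c t => simp [translateB_eq, escapeChunkA]

-- ===== VERDICT (by name: the statement is the Claim_ definition above) =====
theorem render_mdv2_py_spec : Claim_equal_render_mdv2_py := by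
  intro text _
  unfold Spec_render_mdv2_py render_mdv2_py render_mdv2_py_alt
  simp only [join_nil_flatten, PySem.Chars.join_singleton]
  congr 1
  congr 1
  refine List.map_congr_left (fun l _ => ?_)
  rw [loopA_eq_Rcore, coreB_eq_Rcore l.length l rfl]
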